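-- pv_equiv track=rewrite | github.com/Nmr-gtb/nosite | src/detect_website.py | est_blacklist
-- ===== SOURCE A (Python) =====
-- DOMAINES_BROKERS = {
--     # Data brokers / registres
--     "pappers.fr", "societe.com", "societeinfo.com", "infogreffe.fr",
--     "verif.com", "bilans-gratuits.fr", "sirene.fr", "manageo.fr", "score3.fr",
--     "corporama.com", "dirigeant.com", "rcs-national.com",
--     "entreprises-et-societes.fr", "lefigaro.fr", "lagazettefrance.fr",
--     "kompass.com", "europages.fr", "trouverunesociete.com", "ellisphere.com",
--     "bodacc.fr", "infonet.fr", "cartesfrance.fr", "scores-decisions.com",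
--     # Annuaires généralistes
--     "pagesjaunes.fr", "118218.fr", "118000.fr", "yelp.fr", "yelp.com",
--     "tripadvisor.fr", "tripadvisor.com",
--     "google.com", "google.fr", "bing.com", "waze.com",
--     # Réseaux sociaux
--     "linkedin.com", "facebook.com", "instagram.com", "twitter.com", "x.com",
--     "youtube.com", "tiktok.com", "pinterest.fr", "pinterest.com",
--     # Ordres professionnels & annuaires métier (portails, pas site propre)
--     "notaires.fr", "avocat.fr", "village-justice.com",
--     "annuaire-notaires.com", "immonot.com", "encheres-publiques.com",
--     "cnhj.fr", "ordre-medecins.fr",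
--     # Agrégateurs immo (pas le site d'une agence propre)
--     "seloger.com", "leboncoin.fr", "logic-immo.com", "bienici.com",
--     "pap.fr", "avendrealouer.fr", "fnaim.fr", "century21.fr",
--     # Médias et actualités
--     "lesechos.fr", "lemonde.fr", "bfmtv.com", "20minutes.fr", "ouest-france.fr",
--     # Emploi
--     "indeed.fr", "indeed.com", "hellowork.com", "glassdoor.fr", "glassdoor.com",
--     "welcometothejungle.com",
-- }
--
-- PORTAILS_AVEC_SOUS_DOMAINES_LEGITIMES = {"notaires.fr", "avocat.fr"}
--
-- SUFFIXES_BROKERS = {"data.gouv.fr"}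
--
-- def est_blacklist(domaine: str) -> bool:
--     """
--     True si le domaine est blacklisté. Exception pour les sous-domaines
--     légitimes de notaires.fr / avocat.fr (sites de cabinets hébergés sur
--     le portail professionnel — ex: excen.notaires.fr).
--     """
--     if not domaine:
--         return True
--     # 1. Sous-domaine d'un portail légitime → accepté (retour False immédiat)
--     for portail in PORTAILS_AVEC_SOUS_DOMAINES_LEGITIMES:
--         if domaine.endswith("." + portail):
--             prefix = domaine[: -(len(portail) + 1)]
--             if prefix and prefix != "www":
--                 return False
--     # 2. Suffixe registre (ex: *.data.gouv.fr) → rejeté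
--     for suffix in SUFFIXES_BROKERS:
--         if domaine == suffix or domaine.endswith("." + suffix):
--             return True
--     # 3. Blacklist en suffix-match : `kompass.com` rejette aussi `fr.kompass.com`
--     for root in DOMAINES_BROKERS:
--         if domaine == root or domaine.endswith("." + root):
--             return True
--     return False
-- ===== SOURCE B (Python) =====
-- DOMAINES_BROKERS = {
--     "pappers.fr", "societe.com", "societeinfo.com", "infogreffe.fr",
--     "verif.com", "bilans-gratuits.fr", "sirene.fr", "manageo.fr", "score3.fr",
--     "corporama.com", "dirigeant.com", "rcs-national.com",
--     "entreprises-et-societes.fr", "lefigaro.fr", "lagazettefrance.fr",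
--     "kompass.com", "europages.fr", "trouverunesociete.com", "ellisphere.com",
--     "bodacc.fr", "infonet.fr", "cartesfrance.fr", "scores-decisions.com",
--     "pagesjaunes.fr", "118218.fr", "118000.fr", "yelp.fr", "yelp.com",
--     "tripadvisor.fr", "tripadvisor.com",
--     "google.com", "google.fr", "bing.com", "waze.com",
--     "linkedin.com", "facebook.com", "instagram.com", "twitter.com", "x.com",
--     "youtube.com", "tiktok.com", "pinterest.fr", "pinterest.com",
--     "notaires.fr", "avocat.fr", "village-justice.com",
--     "annuaire-notaires.com", "immonot.com", "encheres-publiques.com",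
--     "cnhj.fr", "ordre-medecins.fr",
--     "seloger.com", "leboncoin.fr", "logic-immo.com", "bienici.com",
--     "pap.fr", "avendrealouer.fr", "fnaim.fr", "century21.fr",
--     "lesechos.fr", "lemonde.fr", "bfmtv.com", "20minutes.fr", "ouest-france.fr",
--     "indeed.fr", "indeed.com", "hellowork.com", "glassdoor.fr", "glassdoor.com",
--     "welcometothejungle.com",
-- }
--
-- SUFFIXES_BROKERS = {"data.gouv.fr"}
--
--
-- def _portail_exempt(domaine):
--     """True iff domaine is a legitimate sub-domain of a professional portal."""
--     for portail in ("notaires.fr", "avocat.fr"):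
--         tail = "." + portail
--         if domaine.endswith(tail):
--             prefix = domaine[:-len(tail)]
--             if prefix and prefix != "www":
--                 return True
--     return False
--
--
-- def est_blacklist(domaine: str) -> bool:
--     if not domaine:
--         return True
--     if _portail_exempt(domaine):
--         return False
--     # every candidate suffix of `domaine` at a dot boundary, plus `domaine` itself
--     candidates = {domaine}
--     for i, ch in enumerate(domaine):
--         if ch == ".":
--             candidates.add(domaine[i + 1:])
--     return not candidates.isdisjoint(SUFFIXES_BROKERS | DOMAINES_BROKERS)
-- ===== Notes on version B (the rewrite author's own statement) =====
-- stated objective: alternative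
-- what changed: B builds the set of dot-boundary suffixes of the domain once in a single pass and decides by a set intersection with the (unioned) blacklist, instead of A's per-blacklist-entry equality/endswith scans.
import Mathlib
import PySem

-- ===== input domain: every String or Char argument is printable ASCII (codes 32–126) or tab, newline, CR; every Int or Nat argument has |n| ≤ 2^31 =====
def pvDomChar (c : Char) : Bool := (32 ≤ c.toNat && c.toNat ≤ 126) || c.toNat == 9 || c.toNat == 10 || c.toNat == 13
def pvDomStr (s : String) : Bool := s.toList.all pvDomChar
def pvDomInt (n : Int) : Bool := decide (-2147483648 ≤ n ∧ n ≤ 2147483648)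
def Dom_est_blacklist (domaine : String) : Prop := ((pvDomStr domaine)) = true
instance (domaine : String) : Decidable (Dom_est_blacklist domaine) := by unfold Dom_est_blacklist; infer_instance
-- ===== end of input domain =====

-- B replaces A's per-blacklist-entry equality/endswith scans by one pass that collects the
-- domain's dot-boundary suffixes into a set and intersects it with the blacklist (alternative, not faster).

-- ===== PORT A =====
def pvBrokersDomaines : List String := [
  "pappers.fr", "societe.com", "societeinfo.com", "infogreffe.fr",
  "verif.com", "bilans-gratuits.fr", "sirene.fr", "manageo.fr", "score3.fr",
  "corporama.com", "dirigeant.com", "rcs-national.com",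
  "entreprises-et-societes.fr", "lefigaro.fr", "lagazettefrance.fr",
  "kompass.com", "europages.fr", "trouverunesociete.com", "ellisphere.com",
  "bodacc.fr", "infonet.fr", "cartesfrance.fr", "scores-decisions.com",
  "pagesjaunes.fr", "118218.fr", "118000.fr", "yelp.fr", "yelp.com",
  "tripadvisor.fr", "tripadvisor.com",
  "google.com", "google.fr", "bing.com", "waze.com",
  "linkedin.com", "facebook.com", "instagram.com", "twitter.com", "x.com",
  "youtube.com", "tiktok.com", "pinterest.fr", "pinterest.com",
  "notaires.fr", "avocat.fr", "village-justice.com",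
  "annuaire-notaires.com", "immonot.com", "encheres-publiques.com",
  "cnhj.fr", "ordre-medecins.fr",
  "seloger.com", "leboncoin.fr", "logic-immo.com", "bienici.com",
  "pap.fr", "avendrealouer.fr", "fnaim.fr", "century21.fr",
  "lesechos.fr", "lemonde.fr", "bfmtv.com", "20minutes.fr", "ouest-france.fr",
  "indeed.fr", "indeed.com", "hellowork.com", "glassdoor.fr", "glassdoor.com",
  "welcometothejungle.com"]

def pvPortails : List String := ["notaires.fr", "avocat.fr"]

def pvSuffixesBrokers : List String := ["data.gouv.fr"]

-- A's first loop: true iff some iteration reaches `return False`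
-- (the portal conditions are mutually exclusive, so set-iteration order is irrelevant)
def pvLoopPortails (domaine : String) : Bool :=
  pvPortails.any (fun portail =>
    PySem.Str.endswith domaine ("." ++ portail) &&
      (let pre := PySem.Str.slice domaine none (some (-((portail.length : Int) + 1)))
       decide (pre ≠ "") && decide (pre ≠ "www")))

def est_blacklist (domaine : String) : Bool :=
  if domaine = "" then true
  else if pvLoopPortails domaine then false
  else if pvSuffixesBrokers.any (fun suffix =>
      domaine == suffix || PySem.Str.endswith domaine ("." ++ suffix)) then true
  else if pvBrokersDomaines.any (fun root =>
      domaine == root || PySem.Str.endswith domaine ("." ++ root)) then true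
  else false

-- ===== PORT B =====
-- Source B's _portail_exempt helper (loop over the two-portal tuple)
def pvPortailExempt (domaine : String) : Bool :=
  (["notaires.fr", "avocat.fr"] : List String).any (fun portail =>
    let tail := "." ++ portail
    PySem.Str.endswith domaine tail &&
      (let pre := PySem.Str.slice domaine none (some (-(tail.length : Int)))
       decide (pre ≠ "") && decide (pre ≠ "www")))

-- Source B's candidate-suffix set: {domaine} plus domaine[i+1:] for every dot position i
def pvCandidates (domaine : String) : PySem.Set String :=
  (PySem.List.enumerate domaine.toList 0).foldl
    (fun s p => if p.2 == '.' then PySem.Set.add s (PySem.Str.slice domaine (some (p.1 + 1)) none) else s)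
    (PySem.Set.ofList [domaine])

def est_blacklist_alt (domaine : String) : Bool :=
  if domaine = "" then true
  else if pvPortailExempt domaine then false
  else !(PySem.Set.isdisjoint (pvCandidates domaine)
          (PySem.Set.union (PySem.Set.ofList pvSuffixesBrokers) pvBrokersDomaines))

-- ===== PRECONDITION & SPEC =====
def Spec_est_blacklist (domaine : String) (out : Bool) : Prop := out = est_blacklist_alt domaine
instance (domaine : String) (out : Bool) : Decidable (Spec_est_blacklist domaine out) := by unfold Spec_est_blacklist; infer_instance

-- ===== CLAIM (what is proved, stated in full; the proofs are below) =====
def Claim_equal_est_blacklist : Prop := ∀ (domaine : String), Dom_est_blacklist domaine → Spec_est_blacklist domaine (est_blacklist domaine)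

-- ===== LEMMAS AND PROOFS =====

-- the two portal checks compute the same bound (len(portail)+1 = len("."+portail))
lemma portail_eq (d : String) : pvLoopPortails d = pvPortailExempt d := by
  have h1 : ("notaires.fr" : String).length = 11 := rfl
  have h2 : ("avocat.fr" : String).length = 9 := rfl
  simp only [pvLoopPortails, pvPortailExempt, pvPortails, List.any_cons, List.any_nil]
  norm_num [h1, h2, show ("." : String).length = 1 from rfl]

-- membership in a conditional-add fold
lemma mem_foldl_addIf {α β : Type} [BEq α] [LawfulBEq α] (P : β → Bool) (f : β → α)
    (l : List β) (s : PySem.Set α) (y : α) :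
    (y ∈ l.foldl (fun s b => if P b then PySem.Set.add s (f b) else s) s) ↔
      y ∈ s ∨ ∃ b ∈ l, P b = true ∧ y = f b := by
  induction l generalizing s with
  | nil => simp
  | cons b l ih =>
    simp only [List.foldl_cons]
    by_cases hb : P b = true
    · simp only [hb, if_pos]
      rw [ih]
      simp [PySem.Set.mem_add, hb]
      tauto
    · simp only [hb, if_neg, Bool.false_eq_true, not_false_iff]
      rw [ih]
      simp [hb]

lemma drop_len_append {α : Type} (u v : List α) : (u ++ v).drop u.length = v := by
  induction u with
  | nil => rfl
  | cons a u ih => simp [ih]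

-- dot-boundary suffixes of a list of chars
lemma dot_suffix_iff (cs t : List Char) :
    (∃ k, ∃ _ : k < cs.length, cs[k] = '.' ∧ t = cs.drop (k + 1)) ↔ ('.' :: t) <:+ cs := by
  constructor
  · rintro ⟨k, hk, hdot, rfl⟩
    have h1 : cs.drop k = cs[k] :: cs.drop (k + 1) := List.drop_eq_getElem_cons hk
    rw [hdot] at h1
    rw [← h1]
    exact List.drop_suffix k cs
  · rintro ⟨pre, hpre⟩
    refine ⟨pre.length, ?_, ?_, ?_⟩
    · have := congrArg List.length hpre
      simp at this; omega
    · have : cs[pre.length]'(by have := congrArg List.length hpre; simp at this; omega)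
          = ('.' :: t)[0]'(by simp) := by
        subst hpre
        rw [List.getElem_append_right (by omega)]
        simp
      simpa using this
    · subst hpre
      rw [show pre ++ '.' :: t = (pre ++ ['.']) ++ t from by simp,
        show pre.length + 1 = (pre ++ ['.']).length from by simp]
      exact (drop_len_append _ _).symm

-- membership in Source B's candidate set
lemma mem_candidates (d x : String) :
    x ∈ pvCandidates d ↔ x = d ∨ ('.' :: x.toList) <:+ d.toList := by
  unfold pvCandidates
  rw [mem_foldl_addIf]
  simp only [PySem.Set.mem_ofList, List.mem_singleton]
  constructor
  · rintro (rfl | ⟨p, hp, hdot, rfl⟩)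
    · exact Or.inl rfl
    · right
      rw [PySem.List.mem_enumerate_iff] at hp
      obtain ⟨k, hk, rfl⟩ := hp
      rw [← dot_suffix_iff d.toList]
      refine ⟨k, hk, by simpa using hdot, ?_⟩
      have : ((0 : Int) + k) + 1 = ((k + 1 : Nat) : Int) := by push_cast; ring
      simp only [this]
      rw [show (PySem.Str.slice d (some ((k + 1 : Nat) : Int)) none).toList
            = PySem.Chars.slice d.toList (some ((k + 1 : Nat) : Int)) none from by simp,
          PySem.Chars.slice_eq_listSlice, PySem.List.slice_from_natCast]
  · rintro (rfl | hsuf)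
    · exact Or.inl rfl
    · right
      rw [← dot_suffix_iff d.toList] at hsuf
      obtain ⟨k, hk, hdot, hx⟩ := hsuf
      refine ⟨((0 : Int) + k, d.toList[k]), ?_, by simpa using hdot, ?_⟩
      · rw [PySem.List.mem_enumerate_iff]; exact ⟨k, hk, rfl⟩
      · apply String.ext  -- strings with equal toList are equal
        have : ((0 : Int) + k) + 1 = ((k + 1 : Nat) : Int) := by push_cast; ring
        simp only [this]
        rw [show (PySem.Str.slice d (some ((k + 1 : Nat) : Int)) none).toList
              = PySem.Chars.slice d.toList (some ((k + 1 : Nat) : Int)) none from by simp,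
            PySem.Chars.slice_eq_listSlice, PySem.List.slice_from_natCast]
        exact hx

-- A's per-root check is membership in B's candidate set
lemma cond_iff_mem (d r : String) :
    ((d == r) = true ∨ PySem.Str.endswith d ("." ++ r) = true) ↔ r ∈ pvCandidates d := by
  rw [mem_candidates]
  simp only [beq_iff_eq]
  constructor
  · rintro (rfl | h)
    · exact Or.inl rfl
    · right
      rw [PySem.Str.endswith_eq, PySem.Chars.endswith_iff] at h
      simpa using h
  · rintro (rfl | h)
    · exact Or.inl rfl
    · right
      rw [PySem.Str.endswith_eq, PySem.Chars.endswith_iff]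
      simpa using h

lemma blacklist_scan_eq (d : String) :
    ((pvSuffixesBrokers.any fun suffix => d == suffix || PySem.Str.endswith d ("." ++ suffix)) ||
     (pvBrokersDomaines.any fun root => d == root || PySem.Str.endswith d ("." ++ root)))
    = !(PySem.Set.isdisjoint (pvCandidates d)
          (PySem.Set.union (PySem.Set.ofList pvSuffixesBrokers) pvBrokersDomaines)) := by
  rw [Bool.eq_iff_iff]
  simp only [Bool.or_eq_true, List.any_eq_true, Bool.not_eq_true', Bool.eq_false_iff, ne_eq,
    PySem.Set.isdisjoint_iff, PySem.Set.mem_union, PySem.Set.mem_ofList]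
  push Not
  constructor
  · rintro (⟨r, hr, hc⟩ | ⟨r, hr, hc⟩) <;> exact ⟨r, (cond_iff_mem d r).1 hc, by tauto⟩
  · rintro ⟨x, hx, h | h⟩
    · exact Or.inl ⟨x, h, (cond_iff_mem d x).2 hx⟩
    · exact Or.inr ⟨x, h, (cond_iff_mem d x).2 hx⟩

lemma main_eq (d : String) : est_blacklist d = est_blacklist_alt d := by
  by_cases hd : d = ""
  · simp [est_blacklist, est_blacklist_alt, hd]
  by_cases hp : pvPortailExempt d = true
  · simp [est_blacklist, est_blacklist_alt, hd, hp, portail_eq]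
  replace hp : pvPortailExempt d = false := by simpa using hp
  simp only [est_blacklist, est_blacklist_alt, hd, portail_eq, hp, if_false, Bool.false_eq_true,
    Bool.if_true_left, Bool.if_false_right, Bool.and_true, Bool.decide_eq_true]
  exact blacklist_scan_eq d

-- ===== VERDICT (by name: the statement is the Claim_ definition above) =====
theorem est_blacklist_spec : Claim_equal_est_blacklist := by
  intro d _
  unfold Spec_est_blacklist
  exact main_eq d
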